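-- pv_equiv track=rewrite | github.com/amandaclare/lyndon-factors | enhanced_factors.py | choose_pi
-- ===== SOURCE A (Python) =====
-- def choose_pi(fL_prs):
--     """Choose the leftmost pr with the minimal number of factors"""
--     # assumes fL_prs is not empty
--     (orig, facs) = fL_prs[0]
--     min_num = len(facs)
--     if len(fL_prs) == 1:
--         return (min_num, orig, facs)
--     else: # check the others
--         for (o, fs) in fL_prs[1:]:
--             num = len(fs)
--             if num < min_num:
--                 min_num = num
--                 orig = o
--                 facs = fs
--         return (min_num, orig, facs)
-- ===== SOURCE B (Python) =====
-- def choose_pi(fL_prs):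
--     """Choose the leftmost pr with the minimal number of factors"""
--     # assumes fL_prs is not empty
--     min_num = min(len(fs) for _, fs in fL_prs)
--     for o, fs in fL_prs:
--         if len(fs) == min_num:
--             return (min_num, o, fs)
-- ===== Notes on version B (the rewrite author's own statement) =====
-- stated objective: simpler
-- what changed: Replaces A's single track-while-scan pass carrying (min,orig,facs) state by two stateless passes: compute the minimal factor count with min(), then return the first pair attaining it.
import Mathlib
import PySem

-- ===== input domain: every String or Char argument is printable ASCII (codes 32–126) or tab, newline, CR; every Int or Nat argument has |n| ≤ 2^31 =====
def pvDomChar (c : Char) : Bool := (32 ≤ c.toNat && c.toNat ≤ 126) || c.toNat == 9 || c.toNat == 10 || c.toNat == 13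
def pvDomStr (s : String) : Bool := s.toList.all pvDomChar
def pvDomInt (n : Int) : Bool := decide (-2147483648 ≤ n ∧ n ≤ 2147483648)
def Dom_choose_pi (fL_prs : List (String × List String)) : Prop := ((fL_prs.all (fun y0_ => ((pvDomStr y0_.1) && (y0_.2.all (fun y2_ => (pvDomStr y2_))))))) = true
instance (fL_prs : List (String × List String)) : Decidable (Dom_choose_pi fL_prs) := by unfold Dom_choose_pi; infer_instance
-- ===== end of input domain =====

-- B replaces A's single stateful track-while-scan pass by two stateless passes
-- (min of the counts, then first pair attaining it); return-value equivalence on nonempty input.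

-- ===== PORT A =====
-- A: take fL_prs[0] as current best, then scan fL_prs[1:] updating on strictly smaller count.
def choose_pi (fL_prs : List (String × List String)) : Int × String × List String :=
  match fL_prs with
  | [] => (0, "", [])  -- Python raises IndexError here; excluded by Pre_choose_pi
  | (orig, facs) :: rest =>
    if fL_prs.length == 1 then ((facs.length : Int), orig, facs)
    else
      rest.foldl
        (fun acc p =>
          if (p.2.length : Int) < acc.1 then ((p.2.length : Int), p.1, p.2) else acc)
        ((facs.length : Int), orig, facs)

-- ===== PORT B =====
-- B: min_num = min(len(fs) for _, fs in fL_prs); then first pair with len(fs) == min_num.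
def choose_pi_alt (fL_prs : List (String × List String)) : Int × String × List String :=
  match fL_prs with
  | [] => (0, "", [])  -- Python raises ValueError here; excluded by Pre_choose_pi
  | p :: rest =>
    let min_num : Int := rest.foldl (fun m q => min m (q.2.length : Int)) (p.2.length : Int)
    match fL_prs.find? (fun q => (q.2.length : Int) == min_num) with
    | some q => (min_num, q.1, q.2)
    | none => (min_num, "", [])  -- unreachable: the minimum is attained

-- ===== PRECONDITION & SPEC =====
-- Pre_ excludes only the empty list, on which A raises IndexError (and B ValueError).
def Pre_choose_pi (fL_prs : List (String × List String)) : Prop := fL_prs ≠ []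
instance (fL_prs : List (String × List String)) : Decidable (Pre_choose_pi fL_prs) := by unfold Pre_choose_pi; infer_instance
def pvWitness_choose_pi : (List (String × List String)) := [("ab", ["a", "b"]), ("c", ["c"])]

def Spec_choose_pi (fL_prs : List (String × List String)) (out : Int × String × List String) : Prop := out = choose_pi_alt fL_prs
instance (fL_prs : List (String × List String)) (out : Int × String × List String) : Decidable (Spec_choose_pi fL_prs out) := by unfold Spec_choose_pi; infer_instance

-- ===== CLAIM (what is proved, stated in full; the proofs are below) =====
def Claim_equal_choose_pi : Prop := ∀ (fL_prs : List (String × List String)), Dom_choose_pi fL_prs → Pre_choose_pi fL_prs → Spec_choose_pi fL_prs (choose_pi fL_prs)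

-- ===== LEMMAS AND PROOFS =====

-- the body of choose_pi_alt on a nonempty list, as a function of head and tail
def altBody (o : String) (f : List String) (rest : List (String × List String)) :
    Int × String × List String :=
  let min_num : Int := rest.foldl (fun m q => min m (q.2.length : Int)) (f.length : Int)
  match ((o, f) :: rest).find? (fun q => (q.2.length : Int) == min_num) with
  | some q => (min_num, q.1, q.2)
  | none => (min_num, "", [])

theorem foldl_min_le_init (l : List (String × List String)) (a : Int) :
    l.foldl (fun m q => min m (q.2.length : Int)) a ≤ a := by
  induction l generalizing a with
  | nil => simp
  | cons q t ih =>
    simp only [List.foldl_cons]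
    exact le_trans (ih _) (min_le_left _ _)

theorem key (rest : List (String × List String)) (o : String) (f : List String) :
    rest.foldl
      (fun acc p =>
        if (p.2.length : Int) < acc.1 then ((p.2.length : Int), p.1, p.2) else acc)
      ((f.length : Int), o, f)
    = altBody o f rest := by
  induction rest generalizing o f with
  | nil =>
    simp [altBody, List.find?]
  | cons q t ih =>
    obtain ⟨q1, q2⟩ := q
    simp only [List.foldl_cons]
    by_cases h : (q2.length : Int) < (f.length : Int)
    · -- A replaces its best by (q1, q2); B's min and find skip the head (o, f)
      rw [if_pos h, ih q1 q2]
      unfold altBody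
      have hmin : min (f.length : Int) (q2.length : Int) = (q2.length : Int) :=
        min_eq_right (le_of_lt h)
      simp only [List.foldl_cons, hmin]
      have hle : t.foldl (fun m p => min m (p.2.length : Int)) (q2.length : Int)
          ≤ (q2.length : Int) := foldl_min_le_init t _
      have hne : (((f.length : Int)) ==
          t.foldl (fun m q => min m ((q.2.length : Int))) ((q2.length : Int))) = false := by
        rw [beq_eq_false_iff_ne]
        omega
      simp only [List.find?, hne]
    · -- A keeps its best; B's min and find skip (q1, q2)
      rw [if_neg h, ih o f]
      unfold altBody
      have hmin : min (f.length : Int) (q2.length : Int) = (f.length : Int) :=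
        min_eq_left (by omega)
      simp only [List.foldl_cons, hmin]
      have hle : t.foldl (fun m p => min m (p.2.length : Int)) (f.length : Int)
          ≤ (f.length : Int) := foldl_min_le_init t _
      by_cases hf : ((f.length : Int)) = t.foldl (fun m p => min m (p.2.length : Int)) (f.length : Int)
      · have htrue : (((f.length : Int)) ==
            t.foldl (fun m q => min m ((q.2.length : Int))) ((f.length : Int))) = true := by
          rw [beq_iff_eq]
          exact hf
        simp only [List.find?, htrue]
      · have hffalse : (((f.length : Int)) ==
            t.foldl (fun m q => min m ((q.2.length : Int))) ((f.length : Int))) = false := by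
          rw [beq_eq_false_iff_ne]
          exact hf
        have hqfalse : (((q2.length : Int)) ==
            t.foldl (fun m q => min m ((q.2.length : Int))) ((f.length : Int))) = false := by
          rw [beq_eq_false_iff_ne]
          omega
        simp only [List.find?, hffalse, hqfalse]

-- ===== VERDICT (by name: the statement is the Claim_ definition above) =====
theorem choose_pi_spec : Claim_equal_choose_pi := by
  intro fL_prs _ hpre
  unfold Spec_choose_pi choose_pi choose_pi_alt
  match fL_prs with
  | [] => exact absurd rfl hpre
  | (o, f) :: rest =>
    by_cases h1 : ((o, f) :: rest).length == 1
    · have : rest = [] := by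
        cases rest
        · rfl
        · simp at h1
      subst this
      simp [List.find?]
    · simp only [if_neg h1]
      have := key rest o f
      unfold altBody at this
      exact this
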